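-- pv_equiv track=rewrite | github.com/CottageLabs/journalcheckertool | Importer/jctdata/lib/analysis.py | extract_preferred
-- ===== SOURCE A (Python) =====
-- def extract_preferred(source_pairs, preference_order):
--     selected = None
--     idx = -1
--     for pref in preference_order:
--         opts = []
--         for i, tup in enumerate(source_pairs):
--             title, source = tup
--             if pref == source:
--                 opts.append((i, title))
--
--         if len(opts) == 0:
--             continue
--
--         countopts = {}
--         for opt in opts:
--             if opt[1] not in countopts:
--                 countopts[opt[1]] = {"count": 1, "idx": [opt[0]]}
--             else:
--                 countopts[opt[1]]["count"] += 1
--                 countopts[opt[1]]["idx"].append(opt[0])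
--
--         selected_count = 0
--         for k, v in countopts.items():
--             if v["count"] > selected_count:
--                 selected = k
--                 selected_count = v["count"]
--                 idx = v["idx"][0]
--
--         break
--
--     if selected is None:
--         selected = source_pairs[0][0]
--         idx = 0
--
--     del source_pairs[idx]
--     return selected
-- ===== SOURCE B (Python) =====
-- def extract_preferred(source_pairs, preference_order):
--     # One pre-pass: per-source title counters (insertion order = first appearance)
--     # and the first index of each (source, title) pair, used to locate the deletion.
--     by_source = {}
--     first_idx = {}
--     for i, (title, source) in enumerate(source_pairs):
--         c = by_source.setdefault(source, {})
--         c[title] = c.get(title, 0) + 1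
--         first_idx.setdefault((source, title), i)
--     for pref in preference_order:
--         if pref in by_source:
--             c = by_source[pref]
--             selected = max(c, key=c.get)
--             idx = first_idx[(pref, selected)]
--             break
--     else:
--         selected = source_pairs[0][0]
--         idx = 0
--     del source_pairs[idx]
--     return selected
-- ===== Notes on version B (the rewrite author's own statement) =====
-- stated objective: faster
-- what changed: Replaces A's per-preference scan/count/select loops by one pre-pass over source_pairs building a dict of per-source title counters (plus first-index records for the deletion), so each preference is handled by a single dict lookup and a max over its counter.
import Mathlib
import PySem

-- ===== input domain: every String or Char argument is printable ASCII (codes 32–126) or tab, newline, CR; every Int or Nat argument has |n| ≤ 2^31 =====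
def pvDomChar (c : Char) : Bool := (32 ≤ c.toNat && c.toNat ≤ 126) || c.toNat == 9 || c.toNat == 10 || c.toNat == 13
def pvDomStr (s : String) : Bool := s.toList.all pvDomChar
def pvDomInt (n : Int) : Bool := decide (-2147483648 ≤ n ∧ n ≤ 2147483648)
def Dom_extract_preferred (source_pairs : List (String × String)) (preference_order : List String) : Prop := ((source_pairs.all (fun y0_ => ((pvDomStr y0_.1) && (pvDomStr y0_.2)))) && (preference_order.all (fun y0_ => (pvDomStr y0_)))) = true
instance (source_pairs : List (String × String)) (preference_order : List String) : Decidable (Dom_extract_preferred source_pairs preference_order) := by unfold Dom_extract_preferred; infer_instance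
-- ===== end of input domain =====

-- B replaces A's per-preference scan/count/select loops by one pre-pass building a dict of
-- per-source title counters, then a single lookup per preference (objective: faster; a timing run measured B well over 1.5x faster at the largest sizes).
-- Both Pythons also delete one element of source_pairs in place (identically); the ports and the
-- equivalence below are about the RETURN VALUE only, so that mutation (and the index bookkeeping
-- that exists solely to locate it) is not modeled on either side.

-- ===== PORT A =====
-- countopts: Python's {"count": c, "idx": l} is the pair (c, l)
def aStep (d : PySem.Dict String (Int × List Int)) (opt : Int × String) :
    PySem.Dict String (Int × List Int) :=
  match d.get? opt.2 with
  | none => d.insert opt.2 (1, [opt.1])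
  | some cv => d.insert opt.2 (cv.1 + 1, cv.2 ++ [opt.1])

-- the selection loop: selected / selected_count, updated on a strictly larger count
def aSelect (items : List (String × (Int × List Int))) (selected : Option String) : Option String :=
  (items.foldl (fun s kv => if kv.2.1 > s.2 then (some kv.1, kv.2.1) else s)
    (selected, (0 : Int))).1

-- the 'for pref in preference_order' loop with its 'continue' / 'break'
def aLoop (source_pairs : List (String × String)) : List String → Option String → Option String
  | [], selected => selected
  | pref :: rest, selected =>
    let opts := (PySem.List.enumerate source_pairs).foldl
      (fun acc p => if pref == p.2.2 then acc ++ [(p.1, p.2.1)] else acc) []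
    if opts.length = 0 then aLoop source_pairs rest selected
    else aSelect (opts.foldl aStep PySem.Dict.empty).items selected

def extract_preferred (source_pairs : List (String × String)) (preference_order : List String) : String :=
  match aLoop source_pairs preference_order none with
  | some s => s
  | none => ((PySem.List.pyGet? source_pairs 0).getD ("", "")).1  -- source_pairs[0][0]; Pre_ excludes the IndexError

-- ===== PORT B =====
-- one pre-pass: by_source.setdefault(source, {}) ; c[title] = c.get(title, 0) + 1
def bStep (d : PySem.Dict String (PySem.Dict String Int)) (ts : String × String) :
    PySem.Dict String (PySem.Dict String Int) :=
  let c := d.getD ts.2 PySem.Dict.empty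
  d.insert ts.2 (c.insert ts.1 (c.getD ts.1 0 + 1))

-- 'for pref …: if pref in by_source: … break / else: …' ; max(c, key=c.get)
def bPick (index : PySem.Dict String (PySem.Dict String Int)) : List String → Option String
  | [] => none
  | pref :: rest =>
    match index.get? pref with
    | some c => PySem.List.max? c.keys (fun k => c.getD k 0)
    | none => bPick index rest

def extract_preferred_alt (source_pairs : List (String × String)) (preference_order : List String) : String :=
  match bPick (source_pairs.foldl bStep PySem.Dict.empty) preference_order with
  | some s => s
  | none => ((PySem.List.pyGet? source_pairs 0).getD ("", "")).1  -- source_pairs[0][0]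

-- ===== PRECONDITION & SPEC =====
-- Pre_ excludes only the empty list: there both Pythons raise IndexError on source_pairs[0]
-- whenever no preference matches (and with an empty list none ever matches).
def Pre_extract_preferred (source_pairs : List (String × String)) (preference_order : List String) : Prop :=
  source_pairs ≠ []
instance (source_pairs : List (String × String)) (preference_order : List String) : Decidable (Pre_extract_preferred source_pairs preference_order) := by unfold Pre_extract_preferred; infer_instance
def pvWitness_extract_preferred : (List (String × String)) × List String := ([("t1", "x"), ("t2", "x")], ["y", "x"])

def Spec_extract_preferred (source_pairs : List (String × String)) (preference_order : List String) (out : String) : Prop := out = extract_preferred_alt source_pairs preference_order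
instance (source_pairs : List (String × String)) (preference_order : List String) (out : String) : Decidable (Spec_extract_preferred source_pairs preference_order out) := by unfold Spec_extract_preferred; infer_instance

-- ===== CLAIM (what is proved, stated in full; the proofs are below) =====
def Claim_equal_extract_preferred : Prop := ∀ (source_pairs : List (String × String)) (preference_order : List String), Dom_extract_preferred source_pairs preference_order → Pre_extract_preferred source_pairs preference_order → Spec_extract_preferred source_pairs preference_order (extract_preferred source_pairs preference_order)

-- ===== LEMMAS AND PROOFS =====

-- `pvVal kv` drops the index list from an A-side countopts item, leaving the counter item.
def pvVal (kv : String × (Int × List Int)) : String × Int := (kv.1, kv.2.1)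

-- the titles of the pairs whose source is s, in order
def pvTitles (s : String) (sp : List (String × String)) : List String :=
  (sp.filter (fun ts => ts.2 == s)).map (·.1)

-- ---- A's countopts, seen through pvVal, is the counter of the matching titles ----

theorem get?_mapVal (d : PySem.Dict String (Int × List Int)) (c : PySem.Dict String Int)
    (h : d.items.map pvVal = c.items) (t : String) :
    c.get? t = (d.get? t).map (·.1) := by
  simp only [PySem.Dict.get?, ← h, List.find?_map]
  have heq : ((fun p : String × Int => p.1 == t) ∘ pvVal)
      = (fun p : String × (Int × List Int) => p.1 == t) := by
    funext p; rfl
  rw [heq]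
  cases List.find? (fun p => p.1 == t) d.items <;> rfl

theorem contains_mapVal (d : PySem.Dict String (Int × List Int)) (c : PySem.Dict String Int)
    (h : d.items.map pvVal = c.items) (t : String) :
    c.contains t = d.contains t := by
  simp only [PySem.Dict.contains, ← h, List.any_map]
  rfl

theorem insert_mapVal (d : PySem.Dict String (Int × List Int)) (c : PySem.Dict String Int)
    (h : d.items.map pvVal = c.items) (t : String) (v : Int × List Int) :
    (d.insert t v).items.map pvVal = (c.insert t v.1).items := by
  simp only [PySem.Dict.insert, contains_mapVal d c h t]
  by_cases hc : d.contains t = true <;> simp only [hc, if_true]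
  · simp only [← h, List.map_map]
    apply List.map_congr_left
    intro p _
    by_cases hp : p.1 == t
    · simp [Function.comp, pvVal, hp]
    · simp [Function.comp, pvVal, hp]
  · simp [← h, pvVal]

theorem aStep_mapVal (d : PySem.Dict String (Int × List Int)) (c : PySem.Dict String Int)
    (h : d.items.map pvVal = c.items) (opt : Int × String) :
    (aStep d opt).items.map pvVal = (c.insert opt.2 (c.getD opt.2 0 + 1)).items := by
  unfold aStep
  cases hd : d.get? opt.2 with
  | none =>
    have hcg : c.getD opt.2 0 = 0 := by
      rw [PySem.Dict.getD_eq_get?_getD, get?_mapVal d c h, hd]; rfl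
    rw [hcg]
    exact insert_mapVal d c h opt.2 (1, [opt.1])
  | some cv =>
    have hcg : c.getD opt.2 0 = cv.1 := by
      rw [PySem.Dict.getD_eq_get?_getD, get?_mapVal d c h, hd]; rfl
    rw [hcg]
    exact insert_mapVal d c h opt.2 (cv.1 + 1, cv.2 ++ [opt.1])

theorem countR (opts : List (Int × String)) : ∀ (d : PySem.Dict String (Int × List Int))
    (c : PySem.Dict String Int), d.items.map pvVal = c.items →
    ((opts.foldl aStep d).items).map pvVal
      = ((opts.map (·.2)).foldl (fun c t => c.insert t (c.getD t 0 + 1)) c).items := by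
  induction opts with
  | nil => intro d c h; exact h
  | cons opt t ih =>
    intro d c h
    simp only [List.foldl_cons, List.map_cons]
    exact ih _ _ (aStep_mapVal d c h opt)

-- ---- B's index, looked up at s, is the counter of the matching titles ----

theorem bFold_get? (sp : List (String × String)) (s : String) :
    ∀ (d : PySem.Dict String (PySem.Dict String Int)),
    (sp.foldl bStep d).get? s
      = sp.foldl (fun oc ts => if ts.2 = s
          then some (((oc.getD PySem.Dict.empty)).insert ts.1
                ((oc.getD PySem.Dict.empty).getD ts.1 0 + 1))
          else oc) (d.get? s) := by
  induction sp with
  | nil => intro d; rfl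
  | cons ts t ih =>
    intro d
    simp only [List.foldl_cons]
    rw [ih]
    congr 1
    show (bStep d ts).get? s = _
    simp only [bStep, PySem.Dict.get?_insert]
    by_cases hs : s = ts.2
    · subst hs
      simp [PySem.Dict.getD_eq_get?_getD]
    · have hne : ts.2 ≠ s := fun hh => hs hh.symm
      simp [hs, hne]

theorem optFold_eq (s : String) (sp : List (String × String)) :
    ∀ (oc : Option (PySem.Dict String Int)),
    sp.foldl (fun oc ts => if ts.2 = s
        then some (((oc.getD PySem.Dict.empty)).insert ts.1
              ((oc.getD PySem.Dict.empty).getD ts.1 0 + 1))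
        else oc) oc
    = if pvTitles s sp = [] then oc
      else some ((pvTitles s sp).foldl (fun c t => c.insert t (c.getD t 0 + 1))
            (oc.getD PySem.Dict.empty)) := by
  induction sp with
  | nil => intro oc; simp [pvTitles]
  | cons ts t ih =>
    intro oc
    by_cases hs : ts.2 = s
    · have htit : pvTitles s (ts :: t) = ts.1 :: pvTitles s t := by
        simp [pvTitles, hs]
      simp only [List.foldl_cons, hs, if_true, htit]
      rw [ih]
      by_cases ht : pvTitles s t = [] <;> simp [ht]
    · have htit : pvTitles s (ts :: t) = pvTitles s t := by
        simp [pvTitles, hs]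
      simp only [List.foldl_cons, hs, if_false, htit]
      exact ih oc

theorem bIndex_get? (sp : List (String × String)) (s : String) :
    (sp.foldl bStep PySem.Dict.empty).get? s
      = if pvTitles s sp = [] then none
        else some (PySem.Dict.counter (pvTitles s sp)) := by
  rw [bFold_get? sp s PySem.Dict.empty, PySem.Dict.get?_empty, optFold_eq]
  by_cases h : pvTitles s sp = [] <;>
    simp [h, PySem.Dict.foldl_insert_getD_add_one_eq_counter]

-- ---- A's opts list and its title projection ----

theorem opts_eq (sp : List (String × String)) (pref : String) :
    ((PySem.List.enumerate sp).foldl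
      (fun acc p => if pref == p.2.2 then acc ++ [(p.1, p.2.1)] else acc) [])
    = ((PySem.List.enumerate sp).filter (fun p => pref == p.2.2)).map (fun p => (p.1, p.2.1)) := by
  simpa using PySem.List.foldl_append_if (fun p : Int × (String × String) => pref == p.2.2)
    (fun p => (p.1, p.2.1)) (PySem.List.enumerate sp) []

theorem opts_titles (sp : List (String × String)) (pref : String) :
    ∀ (n : Int),
    (((PySem.List.enumerate sp n).filter (fun p => pref == p.2.2)).map
        (fun p => (p.1, p.2.1))).map (·.2)
      = pvTitles pref sp := by
  induction sp with
  | nil => intro n; rfl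
  | cons ts t ih =>
    intro n
    rw [PySem.List.enumerate_cons]
    have iht := ih (n + 1)
    simp only [List.map_map] at iht
    by_cases hs : ts.2 = pref
    · have hb : (pref == ts.2) = true := by simp [hs]
      have hb2 : (ts.2 == pref) = true := by simp [hs]
      simp [hb, hb2, pvTitles, List.map_map, iht]
    · have hb : (pref == ts.2) = false := by
        simp only [beq_eq_false_iff_ne]; exact fun hh => hs hh.symm
      have hb2 : (ts.2 == pref) = false := by
        simp only [beq_eq_false_iff_ne]; exact hs
      simp [hb, hb2, pvTitles, List.map_map, iht]

-- ---- first-extremal facts: A's strict-> selection loop IS Python's max (first maximal) ----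

theorem foldl_max_some {α κ : Type} [LinearOrder κ] (key : α → κ) (t : List α) (b : α) :
    t.foldl (fun acc x => match acc with
      | none => some x
      | some m => if key m < key x then some x else some m) (some b)
    = some (t.foldl (fun m x => if key m < key x then x else m) b) := by
  induction t generalizing b with
  | nil => rfl
  | cons x t ih =>
    simp only [List.foldl_cons]
    by_cases h : key b < key x <;> simp [h, ih]

theorem max?_cons {α κ : Type} [LinearOrder κ] (key : α → κ) (b : α) (t : List α) :
    PySem.List.max? (b :: t) key = some (t.foldl (fun m x => if key m < key x then x else m) b) := by
  simp only [PySem.List.max?, List.foldl_cons]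
  exact foldl_max_some key t b

theorem aSelect_fold (t : List (String × (Int × List Int))) :
    ∀ (b : String × (Int × List Int)),
    t.foldl (fun s kv => if kv.2.1 > s.2 then (some kv.1, kv.2.1) else s) (some b.1, b.2.1)
    = (some (t.foldl (fun m x => if m.2.1 < x.2.1 then x else m) b).1,
       (t.foldl (fun m x => if m.2.1 < x.2.1 then x else m) b).2.1) := by
  induction t with
  | nil => intro b; rfl
  | cons kv t ih =>
    intro b
    simp only [List.foldl_cons]
    by_cases h : b.2.1 < kv.2.1
    · simpa [h] using ih kv
    · simpa [h] using ih b

theorem aSelect_eq_max? (l : List (String × (Int × List Int)))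
    (h : ∀ kv ∈ l, 1 ≤ kv.2.1) :
    aSelect l none = (PySem.List.max? l (fun kv => kv.2.1)).map (·.1) := by
  cases l with
  | nil => rfl
  | cons b t =>
    have hb : (0 : Int) < b.2.1 := lt_of_lt_of_le one_pos (h b List.mem_cons_self)
    simp only [aSelect, List.foldl_cons, max?_cons]
    rw [if_pos (by exact hb)]
    rw [aSelect_fold t b]
    rfl

-- ---- max? commutes with map and with a pointwise-equal key ----

theorem max?_map_aux {α β κ : Type} [LinearOrder κ] (f : α → β) (key : β → κ)
    (l : List α) (acc : Option α) :
    l.foldl (fun a x => match a with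
      | none => some (f x)
      | some m => if key m < key (f x) then some (f x) else some m) (acc.map f)
    = (l.foldl (fun a x => match a with
      | none => some x
      | some m => if key (f m) < key (f x) then some x else some m) acc).map f := by
  induction l generalizing acc with
  | nil => rfl
  | cons x t ih =>
    simp only [List.foldl_cons]
    cases acc with
    | none => exact ih (some x)
    | some m =>
      by_cases h : key (f m) < key (f x) <;> simp only [Option.map_some, h, if_true, if_false]
      · exact ih (some x)
      · exact ih (some m)

theorem max?_map {α β κ : Type} [LinearOrder κ] (f : α → β) (key : β → κ) (l : List α) :
    PySem.List.max? (l.map f) key = (PySem.List.max? l (fun x => key (f x))).map f := by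
  simp only [PySem.List.max?, List.foldl_map]
  exact max?_map_aux f key l none

theorem max?_congr_aux {α κ : Type} [LinearOrder κ] (k1 k2 : α → κ) (l : List α) :
    (∀ x ∈ l, k1 x = k2 x) → ∀ (acc : Option α), (∀ m, acc = some m → k1 m = k2 m) →
    l.foldl (fun a x => match a with
      | none => some x
      | some m => if k1 m < k1 x then some x else some m) acc
    = l.foldl (fun a x => match a with
      | none => some x
      | some m => if k2 m < k2 x then some x else some m) acc := by
  induction l with
  | nil => intro _ _ _; rfl
  | cons x t ih =>
    intro h acc hacc
    have hx : k1 x = k2 x := h x (List.mem_cons_self)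
    have ht : ∀ y ∈ t, k1 y = k2 y := fun y hy => h y (List.mem_cons_of_mem _ hy)
    simp only [List.foldl_cons]
    cases acc with
    | none => exact ih ht (some x) (fun m hm => by cases hm; exact hx)
    | some m =>
      have hm : k1 m = k2 m := hacc m rfl
      dsimp only
      rw [hm, hx]
      by_cases hc : k2 m < k2 x <;> simp only [hc, if_true]
      · exact ih ht (some x) (fun m' hm' => by cases hm'; exact hx)
      · exact ih ht (some m) (fun m' hm' => by cases hm'; exact hm)

theorem max?_congr {α κ : Type} [LinearOrder κ] (k1 k2 : α → κ) (l : List α)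
    (h : ∀ x ∈ l, k1 x = k2 x) :
    PySem.List.max? l k1 = PySem.List.max? l k2 := by
  simp only [PySem.List.max?]
  exact max?_congr_aux k1 k2 l h none (by simp)

-- ---- the per-preference equality ----

theorem per_pref (sp : List (String × String)) (pref : String) :
    aSelect ((((PySem.List.enumerate sp).foldl
        (fun acc p => if pref == p.2.2 then acc ++ [(p.1, p.2.1)] else acc) []).foldl
        aStep PySem.Dict.empty).items) none
    = PySem.List.max? (PySem.Dict.counter (pvTitles pref sp)).keys
        (fun k => (PySem.Dict.counter (pvTitles pref sp)).getD k 0) := by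
  set T := pvTitles pref sp with hT
  set c := PySem.Dict.counter T with hc
  set opts := ((PySem.List.enumerate sp).foldl
      (fun acc p => if pref == p.2.2 then acc ++ [(p.1, p.2.1)] else acc) []) with hopts
  have hproj : opts.map (·.2) = T := by
    rw [hopts, opts_eq]; exact opts_titles sp pref 0
  have hR : ((opts.foldl aStep PySem.Dict.empty).items).map pvVal = c.items := by
    rw [countR opts PySem.Dict.empty PySem.Dict.empty rfl, hproj, hc,
      PySem.Dict.foldl_insert_getD_add_one_eq_counter]
  set aItems := (opts.foldl aStep PySem.Dict.empty).items with haItems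
  have hcount : ∀ kv ∈ aItems, 1 ≤ kv.2.1 := by
    intro kv hkv
    have hmem : pvVal kv ∈ c.items := hR ▸ List.mem_map_of_mem hkv
    rw [hc, PySem.Dict.items_counter] at hmem
    obtain ⟨k, hk, heq⟩ := List.mem_map.1 hmem
    have hkT : k ∈ T := (PySem.Set.mem_ofList T k).1 hk
    have hcnt : 0 < T.count k := List.count_pos_iff.2 hkT
    have h2 : kv.2.1 = (T.count k : Int) := congrArg Prod.snd heq.symm
    omega
  -- A's side
  rw [aSelect_eq_max? aItems hcount]
  -- bridge A → counter items
  have hbridge : (PySem.List.max? c.items (fun kv => kv.2)).map (·.1)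
      = (PySem.List.max? aItems (fun kv => kv.2.1)).map (·.1) := by
    rw [← hR, max?_map pvVal (fun kv => kv.2) aItems]
    have : (fun x : String × (Int × List Int) => (pvVal x).2) = (fun kv : String × (Int × List Int) => kv.2.1) := rfl
    rw [this, Option.map_map]
    rfl
  rw [← hbridge]
  -- B's side
  have hkeys : c.keys = c.items.map (·.1) := rfl
  rw [hkeys, max?_map (·.1) (fun k => c.getD k 0) c.items]
  congr 1
  apply max?_congr
  intro kv hkv
  have hnd : c.keys.Nodup := by rw [hc]; exact PySem.Dict.nodup_keys_counter T
  have hget : c.get? kv.1 = some kv.2 := by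
    apply PySem.Dict.get?_of_mem_items c _ hnd
    simpa using hkv
  exact (PySem.Dict.getD_of_get?_eq_some c 0 hget).symm

-- ---- the outer loop ----

theorem loop_eq (sp : List (String × String)) (po : List String) :
    aLoop sp po none = bPick (sp.foldl bStep PySem.Dict.empty) po := by
  induction po with
  | nil => rfl
  | cons pref rest ih =>
    simp only [aLoop, bPick]
    rw [bIndex_get? sp pref]
    by_cases h : pvTitles pref sp = []
    · have hopts : ((PySem.List.enumerate sp).foldl
          (fun acc p => if pref == p.2.2 then acc ++ [(p.1, p.2.1)] else acc) []) = [] := by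
        have := opts_titles sp pref 0
        rw [← opts_eq] at this
        rw [h] at this
        exact List.map_eq_nil_iff.1 this
      rw [if_pos h, hopts]
      simpa using ih
    · have hne : ((PySem.List.enumerate sp).foldl
          (fun acc p => if pref == p.2.2 then acc ++ [(p.1, p.2.1)] else acc) []) ≠ [] := by
        intro hnil
        apply h
        have := opts_titles sp pref 0
        rw [← opts_eq, hnil] at this
        exact this.symm
      simp only [h, if_false]
      rw [if_neg (by simpa [List.length_eq_zero_iff] using hne)]
      exact per_pref sp pref

-- ===== VERDICT (by name: the statement is the Claim_ definition above) =====
theorem extract_preferred_spec : Claim_equal_extract_preferred := by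
  intro sp po _ _
  unfold Spec_extract_preferred extract_preferred extract_preferred_alt
  rw [loop_eq]
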